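-- pv_equiv track=rewrite | github.com/spencerperley/CPE_202 | src/Assignment2/exp_eval.py | postfix_valid
-- ===== SOURCE A (Python) =====
-- def isNum(s : str) -> bool:
--     """parses trough a string and valaidates whether or not it is a valid number
--     meaning it has only one '.' and has only digets other than that"""
--     """Signature: takes a string and returns true if it is a valid number """
--     dotfirst = True
--     for i in s:
--         if not (i.isdigit() or (i == "." and dotfirst)):
--             return False
--         if (i == "." and dotfirst):
--             dotfirst = False
--
--     return True
--
-- def postfix_valid(postfixexpr : str) -> bool:
--     """takes a string seperated by spaces and determins if it is a valid postfix expression"""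
--     """Signature: takes a possible posfix expersion as a string seperated by spaces and returns true if it is a valid posfix expression and false otherwise"""
--     if not postfixexpr:
--         return False
--     tokenList = postfixexpr.split(" ")
--     numC = 0
--     oprC = 0
--     for token in tokenList: # parsese through each character and evaluatese whether it is a valid token and if has a valid placement given each operator takes two armumenmts
--         if isNum(token):
--             numC += 1
--         elif (token in "+-*/^"):
--             oprC += 1
--         else:
--             return False
--         if not (numC > oprC):
--             return False
--
--     if numC == oprC+1:
--         return True
--     return False
-- ===== SOURCE B (Python) =====
-- def isNum(s: str) -> bool:
--     dotfirst = True
--     for i in s: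
--         if not (i.isdigit() or (i == "." and dotfirst)):
--             return False
--         if i == "." and dotfirst:
--             dotfirst = False
--     return True
--
--
-- def postfix_valid(postfixexpr: str) -> bool:
--     """Two-phase check: map each token to a stack-depth delta, then scan prefix sums."""
--     if not postfixexpr:
--         return False
--     deltas = []
--     for token in postfixexpr.split(" "):
--         if isNum(token):
--             deltas.append(1)
--         elif token in "+-*/^":
--             deltas.append(-1)
--         else:
--             return False
--     depth = 0
--     for d in deltas:
--         depth += d
--         if depth < 1:
--             return False
--     return depth == 1
-- ===== Notes on version B (the rewrite author's own statement) =====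
-- stated objective: alternative
-- what changed: A's single loop interleaving classification with two running counters (numC/oprC) is replaced by a two-phase pipeline: first map every token to a stack-depth delta (+1 for a number, -1 for an operator, reject otherwise), then scan the prefix sums requiring depth >= 1 throughout and depth == 1 at the end.
import Mathlib
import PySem

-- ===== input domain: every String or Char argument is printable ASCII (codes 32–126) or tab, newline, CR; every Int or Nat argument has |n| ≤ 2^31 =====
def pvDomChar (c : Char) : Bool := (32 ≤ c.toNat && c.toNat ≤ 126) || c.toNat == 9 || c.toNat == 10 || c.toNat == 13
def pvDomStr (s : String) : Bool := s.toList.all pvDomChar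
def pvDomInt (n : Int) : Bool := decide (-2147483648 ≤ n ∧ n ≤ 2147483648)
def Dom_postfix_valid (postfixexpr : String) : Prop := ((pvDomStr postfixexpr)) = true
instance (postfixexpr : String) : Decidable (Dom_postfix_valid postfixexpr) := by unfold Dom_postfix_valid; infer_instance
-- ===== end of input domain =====

-- B replaces A's single loop with two interleaved counters by a two-phase pipeline
-- (classify tokens to depth deltas, then scan the prefix sums); same cost, different decomposition.

-- ===== PORT A =====
-- isNum: shared verbatim by A and B (Source B keeps it unchanged)
def pvIsNum : List Char → Bool → Bool
  | [], _ => true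
  | i :: rest, dotfirst =>
    if !(PySem.Chars.isdigit i || (i == '.' && dotfirst)) then false
    else if i == '.' && dotfirst then pvIsNum rest false
    else pvIsNum rest dotfirst

-- A's token loop: two counters, early return False
def pvLoopA : List (List Char) → Int → Int → Bool
  | [], numC, oprC => numC == oprC + 1          -- the post-loop `if numC == oprC+1`
  | token :: rest, numC, oprC =>
    if pvIsNum token true then
      if !(numC + 1 > oprC) then false else pvLoopA rest (numC + 1) oprC
    else if PySem.Chars.isIn token ("+-*/^".toList) then
      if !(numC > oprC + 1) then false else pvLoopA rest numC (oprC + 1)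
    else false

def postfix_valid (postfixexpr : String) : Bool :=
  if postfixexpr == "" then false
  else pvLoopA (PySem.Chars.splitOn postfixexpr.toList [' ']) 0 0

-- ===== PORT B =====
-- phase 1: map each token to its stack-depth delta (+1 number, -1 operator), none = bad token
def pvClassify : List (List Char) → Option (List Int)
  | [] => some []
  | token :: rest =>
    if pvIsNum token true then (pvClassify rest).map (fun ds => 1 :: ds)
    else if PySem.Chars.isIn token ("+-*/^".toList) then (pvClassify rest).map (fun ds => (-1) :: ds)
    else none

-- phase 2: prefix sums must stay ≥ 1 and end at 1
def pvScan : List Int → Int → Bool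
  | [], depth => depth == 1
  | d :: rest, depth =>
    if depth + d < 1 then false else pvScan rest (depth + d)

def postfix_valid_alt (postfixexpr : String) : Bool :=
  if postfixexpr == "" then false
  else
    match pvClassify (PySem.Chars.splitOn postfixexpr.toList [' ']) with
    | none => false
    | some ds => pvScan ds 0

-- ===== PRECONDITION & SPEC =====
def Spec_postfix_valid (postfixexpr : String) (out : Bool) : Prop := out = postfix_valid_alt postfixexpr
instance (postfixexpr : String) (out : Bool) : Decidable (Spec_postfix_valid postfixexpr out) := by unfold Spec_postfix_valid; infer_instance

-- ===== CLAIM (what is proved, stated in full; the proofs are below) =====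
def Claim_equal_postfix_valid : Prop := ∀ (postfixexpr : String), Dom_postfix_valid postfixexpr → Spec_postfix_valid postfixexpr (postfix_valid postfixexpr)

-- ===== LEMMAS AND PROOFS =====
-- A's counter loop equals classify-then-scan, with depth = numC - oprC as the invariant
theorem pvLoop_eq_classify_scan (toks : List (List Char)) :
    ∀ numC oprC : Int,
      pvLoopA toks numC oprC =
        match pvClassify toks with
        | none => false
        | some ds => pvScan ds (numC - oprC) := by
  induction toks with
  | nil =>
      intro numC oprC
      simp only [pvLoopA, pvClassify, pvScan]
      by_cases h : numC = oprC + 1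
      · simp [h]
      · have h1 : (numC == oprC + 1) = false := by simp [h]
        have h2 : (numC - oprC == 1) = false := by
          simp only [beq_eq_false_iff_ne, ne_eq]
          omega
        simp [h1, h2]
  | cons t rest ih =>
      intro numC oprC
      simp only [pvLoopA, pvClassify]
      by_cases hn : pvIsNum t true = true
      · simp only [hn, if_true]
        rw [ih (numC + 1) oprC]
        cases h : pvClassify rest with
        | none => by_cases hc : numC + 1 > oprC <;> simp [hc]
        | some ds =>
            simp only [Option.map_some, pvScan]
            by_cases hc : numC + 1 > oprC
            · have : ¬ (numC - oprC + 1 < 1) := by omega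
              simp [hc, this]
              have : numC + 1 - oprC = numC - oprC + 1 := by omega
              rw [this]
            · have : numC - oprC + 1 < 1 := by omega
              simp [hc, this]
      · simp only [hn, if_false, Bool.false_eq_true]
        rw [show ("+-*/^".toList) = ['+', '-', '*', '/', '^'] from rfl]
        by_cases ho : PySem.Chars.isIn t ['+', '-', '*', '/', '^'] = true
        · simp only [ho, if_true]
          rw [ih numC (oprC + 1)]
          cases h : pvClassify rest with
          | none => by_cases hc : numC > oprC + 1 <;> simp [hc]
          | some ds =>
              simp only [Option.map_some, pvScan]
              by_cases hc : numC > oprC + 1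
              · have : ¬ (numC - oprC + -1 < 1) := by omega
                simp [hc, this]
                have : numC - (oprC + 1) = numC - oprC + -1 := by omega
                rw [this]
              · have : numC - oprC + -1 < 1 := by omega
                simp [hc, this]
        · simp [ho]

-- ===== VERDICT (by name: the statement is the Claim_ definition above) =====
theorem postfix_valid_spec : Claim_equal_postfix_valid := by
  intro s _
  unfold Spec_postfix_valid postfix_valid postfix_valid_alt
  by_cases he : (s == "") = true
  · simp [he]
  · simp only [he, if_false, Bool.false_eq_true]
    rw [pvLoop_eq_classify_scan]
    norm_num
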